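-- pv_equiv track=rewrite | github.com/daniel-reich/turbo-robot | 2C3gtb4treAFyWJMg_11.py | polybius
-- ===== SOURCE A (Python) =====
-- def polybius(text):
--     import string
--     num=[str(a)+str(b) for a in range(1,6) for b in range(1,6)]
--     num.append('24')
--     alpha=list(string.ascii_lowercase)
--     alpha.append(alpha.pop(9))
--     res=[]
--     list1=[]
--     if text[0].lower() in alpha:
--         for i in range(len(text)):
--             if text[i].lower() in alpha:
--                 res.append(num[alpha.index(text[i].lower())])
--             elif text[i]==" ":
--                 res.append(" ")
--         return "".join(res)
--     text=text.split(" ")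
--     for i in text:
--         for x in range(0,len(i)-1,2):
--             list1.append(i[x]+i[x+1])
--         list1.append(" ")
--     for i in range(len(list1)):
--             if list1[i] in num:
--                 res.append(alpha[num.index(list1[i])])
--             else:
--                 res.append(" ")
--     return "".join(res)[0:-1]
-- ===== SOURCE B (Python) =====
-- MERGED = "abcdefghiklmnopqrstuvwxyz"  # 25-letter alphabet with j merged into i
--
-- def polybius(text):
--     c0 = text[0].lower()
--     if 'a' <= c0 <= 'z':
--         # encode: direct coordinate arithmetic, no table lookups
--         out = []
--         for ch in text:
--             l = ch.lower()
--             if 'a' <= l <= 'z':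
--                 p = ord('i' if l == 'j' else l) - ord('a')
--                 if p > 8:
--                     p -= 1
--                 out.append(str(p // 5 + 1) + str(p % 5 + 1))
--             elif ch == ' ':
--                 out.append(' ')
--         return ''.join(out)
--     # decode: per word, pair digits two at a time
--     words = []
--     for w in text.split(' '):
--         buf = []
--         for k in range(0, len(w) - 1, 2):
--             r, c = w[k], w[k + 1]
--             if r in '12345' and c in '12345':
--                 buf.append(MERGED[(ord(r) - ord('1')) * 5 + (ord(c) - ord('1'))])
--             else:
--                 buf.append(' ')
--         words.append(''.join(buf))
--     return ' '.join(words)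
-- ===== Notes on version B (the rewrite author's own statement) =====
-- stated objective: simpler
-- what changed: Replaced A's num/alpha lookup tables and their .index scans by direct coordinate arithmetic on the j-merged 25-letter alphabet, and replaced A's append-a-trailing-separator-then-strip decode assembly by joining per-word decodes with the space separator.
import Mathlib
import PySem

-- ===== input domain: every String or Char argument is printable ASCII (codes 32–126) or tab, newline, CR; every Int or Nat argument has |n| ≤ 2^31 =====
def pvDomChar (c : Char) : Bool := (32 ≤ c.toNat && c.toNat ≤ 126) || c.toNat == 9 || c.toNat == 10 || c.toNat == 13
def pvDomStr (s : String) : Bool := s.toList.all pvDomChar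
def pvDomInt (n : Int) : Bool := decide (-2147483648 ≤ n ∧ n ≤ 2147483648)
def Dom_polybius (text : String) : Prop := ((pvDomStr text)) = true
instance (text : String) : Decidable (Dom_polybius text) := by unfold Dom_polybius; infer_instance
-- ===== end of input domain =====

-- B replaces A's `num`/`alpha` tables and `.index` scans with direct coordinate arithmetic
-- on the j-merged alphabet (objective: simpler; same asymptotic cost).

-- ===== PORT A =====
-- num = [str(a)+str(b) for a in range(1,6) for b in range(1,6)]; num.append('24')
def pvNumA : List (List Char) :=
  ((PySem.List.pyRange 1 6 1).flatMap (fun a =>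
    (PySem.List.pyRange 1 6 1).map (fun b => PySem.Int.toChars a ++ PySem.Int.toChars b)))
  ++ [['2','4']]

-- alpha = list(string.ascii_lowercase); alpha.append(alpha.pop(9))
def pvAlphaA : List Char :=
  let l := "abcdefghijklmnopqrstuvwxyz".toList
  match PySem.List.pop? l 9 with
  | some (c, rest) => rest ++ [c]
  | none => l

-- the body of A's encode loop: letter -> [num[alpha.index(...)]], space -> [" "], else nothing
def pvEncStepA (c : Char) : List (List Char) :=
  if PySem.Chars.lowerChar c ∈ pvAlphaA then
    [(PySem.List.pyGet? pvNumA (((PySem.List.index? pvAlphaA (PySem.Chars.lowerChar c)).getD 0 : Nat) : Int)).getD []]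
  else if c = ' ' then [[' ']]
  else []

-- the inner pairing loop `for x in range(0, len(i)-1, 2): list1.append(i[x]+i[x+1])`
def pvPairsA : List Char → List (List Char)
  | a :: b :: rest => [a, b] :: pvPairsA rest
  | _ => []

-- the body of A's decode loop: if list1[i] in num: alpha[num.index(list1[i])] else " "
def pvDecStepA (p : List Char) : Char :=
  if p ∈ pvNumA then
    (PySem.List.pyGet? pvAlphaA (((PySem.List.index? pvNumA p).getD 0 : Nat) : Int)).getD ' '
  else ' '

def polybius (text : String) : String :=
  match PySem.List.pyGet? text.toList 0 with
  | none => ""   -- Python raises IndexError on empty text (excluded by Pre_polybius)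
  | some c0 =>
    if PySem.Chars.lowerChar c0 ∈ pvAlphaA then
      let res := text.toList.foldl (fun res c => res ++ pvEncStepA c) []
      String.ofList (PySem.Chars.join [] res)
    else
      let words := PySem.Chars.splitOn text.toList [' ']
      let list1 := words.foldl (fun l1 w => l1 ++ pvPairsA w ++ [[' ']]) []
      let res := list1.foldl (fun res p => res ++ [pvDecStepA p]) []
      String.ofList (PySem.List.slice res none (some (-1)))

-- ===== PORT B =====
-- MERGED = "abcdefghiklmnopqrstuvwxyz"
def pvMerged : List Char := "abcdefghiklmnopqrstuvwxyz".toList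

def pvIsDigit15 (c : Char) : Bool := c ∈ ['1', '2', '3', '4', '5']

-- one character of B's encode loop (appended pieces of the final join)
def pvEncChar (c : Char) : List Char :=
  let l := PySem.Chars.lowerChar c
  if 'a' ≤ l ∧ l ≤ 'z' then
    let p0 : Int := ((if l = 'j' then 'i' else l).toNat : Int) - ('a'.toNat : Int)
    let p : Int := if p0 > 8 then p0 - 1 else p0
    PySem.Int.toChars (PySem.Int.floordiv p 5 + 1) ++ PySem.Int.toChars (PySem.Int.mod p 5 + 1)
  else if c = ' ' then [' ']
  else []

-- B's per-word decode loop (pairs two at a time, trailing odd char dropped)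
def pvDecWord : List Char → List Char
  | r :: c :: rest =>
      (if pvIsDigit15 r && pvIsDigit15 c then
        (PySem.List.pyGet? pvMerged
          (((r.toNat : Int) - ('1'.toNat : Int)) * 5 + ((c.toNat : Int) - ('1'.toNat : Int)))).getD ' '
      else ' ') :: pvDecWord rest
  | _ => []

def polybius_alt (text : String) : String :=
  match text.toList with
  | [] => ""   -- Python raises IndexError on empty text (excluded by Pre_polybius)
  | c0 :: _ =>
    let l0 := PySem.Chars.lowerChar c0
    if 'a' ≤ l0 ∧ l0 ≤ 'z' then
      String.ofList (text.toList.flatMap pvEncChar)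
    else
      String.ofList (PySem.Chars.join [' ']
        ((PySem.Chars.splitOn text.toList [' ']).map pvDecWord))

-- ===== PRECONDITION & SPEC =====
-- Pre_ excludes only the empty string, on which both A and B raise IndexError at text[0].
def Pre_polybius (text : String) : Prop := text ≠ ""
instance (text : String) : Decidable (Pre_polybius text) := by unfold Pre_polybius; infer_instance
def pvWitness_polybius : String := "hello world"

def Spec_polybius (text : String) (out : String) : Prop := out = polybius_alt text
instance (text : String) (out : String) : Decidable (Spec_polybius text out) := by unfold Spec_polybius; infer_instance

-- ===== CLAIM (what is proved, stated in full; the proofs are below) =====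
def Claim_equal_polybius : Prop := ∀ (text : String), Dom_polybius text → Pre_polybius text → Spec_polybius text (polybius text)

-- ===== LEMMAS AND PROOFS =====

-- transfer a decidable per-char fact checked on the 128 ASCII codes to any Dom char
theorem pvCharAll {P : Char → Prop} [DecidablePred P]
    (h : ((List.range 128).all fun n => decide (P (Char.ofNat n))) = true)
    (c : Char) (hc : pvDomChar c = true) : P c := by
  have hlt : c.toNat < 128 := by
    simp [pvDomChar] at hc
    omega
  have := List.all_eq_true.mp h c.toNat (List.mem_range.mpr hlt)
  simpa [Char.ofNat_toNat] using of_decide_eq_true this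

-- A's branch test agrees with B's on Dom chars
theorem pvBranchEq (c : Char) (hc : pvDomChar c = true) :
    (PySem.Chars.lowerChar c ∈ pvAlphaA) ↔
      ('a' ≤ PySem.Chars.lowerChar c ∧ PySem.Chars.lowerChar c ≤ 'z') := by
  refine pvCharAll (P := fun c => (PySem.Chars.lowerChar c ∈ pvAlphaA) ↔
      ('a' ≤ PySem.Chars.lowerChar c ∧ PySem.Chars.lowerChar c ≤ 'z')) (by decide) c hc

-- A's encode step flattens to B's encode step on Dom chars
theorem pvEncStepEq (c : Char) (hc : pvDomChar c = true) :
    (pvEncStepA c).flatten = pvEncChar c := by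
  refine pvCharAll (P := fun c => (pvEncStepA c).flatten = pvEncChar c) (by decide) c hc

-- A's decode step on a two-char pair is B's pair computation (all chars)
theorem pvDecStepPair (a b : Char) :
    pvDecStepA [a, b] =
      (if pvIsDigit15 a && pvIsDigit15 b then
        (PySem.List.pyGet? pvMerged
          (((a.toNat : Int) - ('1'.toNat : Int)) * 5 + ((b.toNat : Int) - ('1'.toNat : Int)))).getD ' '
      else ' ') := by
  by_cases hd : (pvIsDigit15 a && pvIsDigit15 b) = true
  · have hab := hd
    simp only [pvIsDigit15, Bool.and_eq_true, decide_eq_true_eq, List.mem_cons, List.not_mem_nil, or_false] at hab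
    obtain ⟨ha, hb⟩ := hab
    rcases ha with rfl | rfl | rfl | rfl | rfl <;> rcases hb with rfl | rfl | rfl | rfl | rfl <;> decide
  · have key : ∀ p ∈ pvNumA,
        pvIsDigit15 (p.getD 0 ' ') = true ∧ pvIsDigit15 (p.getD 1 ' ') = true := by decide
    have hnot : [a, b] ∉ pvNumA := fun hmem => by
      obtain ⟨h1, h2⟩ := key _ hmem
      simp only [List.getD_cons_zero, List.getD_cons_succ] at h1 h2
      exact hd (by rw [h1, h2]; rfl)
    simp only [Bool.not_eq_true] at hd
    rw [hd]
    simp [pvDecStepA, hnot]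

theorem pvDecStepSep : pvDecStepA [' '] = ' ' := by decide

-- A's encode fold, flattened, is B's flatMap
theorem pvEncFold (xs : List Char) (h : ∀ c ∈ xs, pvDomChar c = true) (acc : List (List Char)) :
    (xs.foldl (fun r c => r ++ pvEncStepA c) acc).flatten = acc.flatten ++ xs.flatMap pvEncChar := by
  induction xs generalizing acc with
  | nil => simp
  | cons x xs ih =>
      simp only [List.foldl_cons, List.flatMap_cons]
      rw [ih (fun c hc => h c (List.mem_cons_of_mem _ hc))]
      simp [pvEncStepEq x (h x (List.mem_cons_self))]

-- join [] = flatten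
theorem pvJoinNil (l : List (List Char)) : PySem.Chars.join [] l = l.flatten := by
  induction l with
  | nil => simp [PySem.Chars.join_nil]
  | cons p rest ih =>
      cases rest with
      | nil => simp [PySem.Chars.join_singleton]
      | cons q r => simp [PySem.Chars.join_cons_cons, ih]

-- A's list1 fold is a flatMap
theorem pvList1Fold (ws : List (List Char)) (acc : List (List Char)) :
    ws.foldl (fun l1 w => l1 ++ pvPairsA w ++ [[' ']]) acc
      = acc ++ ws.flatMap (fun w => pvPairsA w ++ [[' ']]) := by
  induction ws generalizing acc with
  | nil => simp
  | cons w ws ih => simp [List.flatMap_def]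

-- A's pair scan mapped through A's decode step is B's per-word decode
theorem pvWordEq : ∀ (w : List Char), (pvPairsA w).map pvDecStepA = pvDecWord w
  | [] => rfl
  | [_] => rfl
  | a :: b :: rest => by
      simp only [pvPairsA, pvDecWord, List.map_cons, pvWordEq rest, pvDecStepPair]

-- gluing words with a trailing space and dropping the last char = join with " "
theorem pvGlue (ws : List (List Char)) :
    (ws.flatMap (fun w => pvDecWord w ++ [' '])).dropLast
      = PySem.Chars.join [' '] (ws.map pvDecWord) := by
  induction ws with
  | nil => simp [PySem.Chars.join_nil]
  | cons w ws ih =>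
      cases ws with
      | nil => simp [PySem.Chars.join_singleton]
      | cons v rest =>
          rw [List.flatMap_cons, List.dropLast_append_of_ne_nil (by simp), ih,
            show List.map pvDecWord (w :: v :: rest)
                = pvDecWord w :: pvDecWord v :: List.map pvDecWord rest from rfl,
            PySem.Chars.join_cons_cons]
          rfl

-- ===== VERDICT (by name: the statement is the Claim_ definition above) =====
theorem polybius_spec : Claim_equal_polybius := by
  intro text hdom hpre
  unfold Spec_polybius
  have hD : ∀ c ∈ text.toList, pvDomChar c = true := by
    simpa [Dom_polybius, pvDomStr, List.all_eq_true] using hdom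
  cases hT : text.toList with
  | nil => exact absurd (String.toList_eq_nil_iff.mp hT) hpre
  | cons c0 rest =>
      have hD' : ∀ c ∈ c0 :: rest, pvDomChar c = true := hT ▸ hD
      have hc0 : pvDomChar c0 = true := hD' c0 List.mem_cons_self
      have hg : PySem.List.pyGet? (c0 :: rest) (0 : Int) = some c0 := by simp [pysem]
      unfold polybius polybius_alt
      rw [hT, hg]
      dsimp only
      by_cases hb : 'a' ≤ PySem.Chars.lowerChar c0 ∧ PySem.Chars.lowerChar c0 ≤ 'z'
      · rw [if_pos ((pvBranchEq c0 hc0).mpr hb), if_pos hb]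
        rw [pvJoinNil, pvEncFold _ hD']
        simp
      · rw [if_neg (fun h => hb ((pvBranchEq c0 hc0).mp h)), if_neg hb]
        rw [PySem.List.slice_to_neg_one, PySem.List.foldl_append_singleton_eq_map,
          pvList1Fold, List.nil_append, List.nil_append, List.map_flatMap]
        have hw : ∀ w : List Char,
            (pvPairsA w ++ [[' ']]).map pvDecStepA = pvDecWord w ++ [' '] := by
          intro w
          rw [List.map_append, pvWordEq w]
          simp [pvDecStepSep]
        simp only [hw]
        exact congrArg String.ofList (pvGlue _)
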